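-- pv_equiv track=rewrite | github.com/yuzthebest/TIL | algorithms 문제풀이/BOJ/1244_스위치켜고끄기.py | get_females
-- ===== SOURCE A (Python) =====
-- def get_females(L, N):
--     j = N-1
--     Left = j-1
--     Right = j+1
--     L[j] = (L[j]+1) % 2
--     while Left >= 0 and Right <= len(L)-1:
--         if L[Left] == L[Right]:
--             L[Left], L[Right] = (L[Left]+1) % 2, (L[Right]+1) %2
--             Left -= 1
--             Right += 1
--         else:
--             break
--     return L
-- ===== SOURCE B (Python) =====
-- def get_females(L, N):
--     # Two-phase version: measure the symmetric radius read-only, then toggle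
--     # the whole block L[j-r .. j+r] in one pass. Mutates L in place like A.
--     j = N - 1
--     r = 1
--     while j - r >= 0 and j + r <= len(L) - 1 and L[j - r] == L[j + r]:
--         r += 1
--     r -= 1
--     for i in range(j - r, j + r + 1):
--         L[i] = (L[i] + 1) % 2
--     return L
-- ===== Notes on version B (the rewrite author's own statement) =====
-- stated objective: alternative
-- what changed: A's single fused loop that mutates the pair L[j-r], L[j+r] while comparing is replaced by a read-only loop that only measures the symmetric radius r, followed by a separate pass toggling the contiguous block L[j-r..j+r] left to right.
import Mathlib
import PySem

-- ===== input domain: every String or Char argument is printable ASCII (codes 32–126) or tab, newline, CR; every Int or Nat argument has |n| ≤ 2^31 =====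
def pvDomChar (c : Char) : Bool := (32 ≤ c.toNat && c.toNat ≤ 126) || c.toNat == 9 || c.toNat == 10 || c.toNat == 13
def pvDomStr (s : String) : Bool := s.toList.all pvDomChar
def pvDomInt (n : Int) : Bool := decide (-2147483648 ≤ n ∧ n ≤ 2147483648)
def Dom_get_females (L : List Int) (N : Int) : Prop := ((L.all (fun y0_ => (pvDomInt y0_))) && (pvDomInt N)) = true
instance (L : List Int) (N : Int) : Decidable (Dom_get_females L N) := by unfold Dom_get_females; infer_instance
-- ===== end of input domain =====

-- B replaces A's fused mutate-while-comparing loop by a read-only pass that measures the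
-- symmetric radius and a separate pass that toggles the contiguous block (objective: alternative).
-- Both Pythons mutate L in place; the equivalence proved here is about the RETURN value only.

-- ===== PORT A =====
-- A's while loop: Left/Right walk outward, toggling matching pairs in place.
def pvLoopA (L : List Int) (Left Right : Int) : List Int :=
  if h : 0 ≤ Left ∧ Right ≤ (L.length : Int) - 1 then
    let a := PySem.List.pyGetD L Left 0
    let b := PySem.List.pyGetD L Right 0
    if a = b then
      pvLoopA (PySem.List.pySetD (PySem.List.pySetD L Left (PySem.Int.mod (a + 1) 2))
                Right (PySem.Int.mod (b + 1) 2)) (Left - 1) (Right + 1)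
    else L
  else L
termination_by (Left + 1).toNat
decreasing_by omega

def get_females (L : List Int) (N : Int) : List Int :=
  let j := N - 1
  -- L[j] = (L[j]+1) % 2 ; Python raises IndexError iff j is out of range (none below, excluded by Pre_)
  match PySem.List.pySet? L j (PySem.Int.mod ((PySem.List.pyGetD L j 0) + 1) 2) with
  | none => []
  | some L' => pvLoopA L' (j - 1) (j + 1)

-- ===== PORT B =====
-- B's read-only measuring loop: smallest r ≥ start at which the guard fails.
def pvMeasureB (L : List Int) (j r : Int) : Int :=
  if h : 0 ≤ j - r ∧ j + r ≤ (L.length : Int) - 1 ∧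
      PySem.List.pyGetD L (j - r) 0 = PySem.List.pyGetD L (j + r) 0 then
    pvMeasureB L j (r + 1)
  else r
termination_by ((L.length : Int) - (j + r)).toNat
decreasing_by omega

def get_females_alt (L : List Int) (N : Int) : List Int :=
  let j := N - 1
  let r := pvMeasureB L j 1 - 1
  (PySem.List.pyRange (j - r) (j + r + 1) 1).foldl
    (fun M i => PySem.List.pySetD M i (PySem.Int.mod ((PySem.List.pyGetD M i 0) + 1) 2)) L

-- ===== PRECONDITION & SPEC =====
-- Pre_ excludes exactly the inputs where both Pythons raise IndexError: N-1 out of range for L.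
def Pre_get_females (L : List Int) (N : Int) : Prop := PySem.Raise.InRange L.length (N - 1)
instance (L : List Int) (N : Int) : Decidable (Pre_get_females L N) := by
  unfold Pre_get_females; infer_instance
def pvWitness_get_females : List Int × Int := ([1, 0, 1, 0, 1], 3)

def Spec_get_females (L : List Int) (N : Int) (out : List Int) : Prop := out = get_females_alt L N
instance (L : List Int) (N : Int) (out : List Int) : Decidable (Spec_get_females L N out) := by
  unfold Spec_get_females; infer_instance

-- ===== CLAIM (what is proved, stated in full; the proofs are below) =====
def Claim_equal_get_females : Prop := ∀ (L : List Int) (N : Int), Dom_get_females L N →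
  Pre_get_females L N → Spec_get_females L N (get_females L N)

-- ===== LEMMAS AND PROOFS =====

-- the list L with every entry in positions [lo, hi] toggled
def pvMask (L : List Int) (lo hi : Int) : List Int :=
  L.mapIdx (fun i x => if lo ≤ (i : Int) ∧ (i : Int) ≤ hi then PySem.Int.mod (x + 1) 2 else x)

-- the guard of both loops at radius k (read on the ORIGINAL list)
def pvGuard (L : List Int) (j k : Int) : Prop :=
  0 ≤ j - k ∧ j + k ≤ (L.length : Int) - 1 ∧
    PySem.List.pyGetD L (j - k) 0 = PySem.List.pyGetD L (j + k) 0

theorem pvMask_length (L : List Int) (lo hi : Int) : (pvMask L lo hi).length = L.length := by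
  simp [pvMask]

theorem pvMask_getElem (L : List Int) (lo hi : Int) (k : Nat) (hk : k < L.length) :
    (pvMask L lo hi)[k]'(by simp [pvMask_length, hk]) =
      if lo ≤ (k : Int) ∧ (k : Int) ≤ hi then PySem.Int.mod (L[k] + 1) 2 else L[k] := by
  simp [pvMask, List.getElem_mapIdx]

theorem pvMask_empty (L : List Int) (lo hi : Int) (h : hi < lo) : pvMask L lo hi = L := by
  apply List.ext_getElem (by simp [pvMask_length])
  intro k h1 h2
  rw [pvMask_getElem L lo hi k h2, if_neg (by omega)]

theorem pvMask_pyGetD_out (L : List Int) (lo hi i : Int) (h0 : 0 ≤ i) (h1 : i < L.length)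
    (h : i < lo ∨ hi < i) :
    PySem.List.pyGetD (pvMask L lo hi) i 0 = PySem.List.pyGetD L i 0 := by
  rw [PySem.List.pyGetD_eq_getElem _ _ h0 (by rw [pvMask_length]; exact_mod_cast h1),
      PySem.List.pyGetD_eq_getElem _ _ h0 (by exact_mod_cast h1),
      pvMask_getElem L lo hi i.toNat (by omega), if_neg (by omega)]

-- toggling just position i of L (0 ≤ i < len) is the singleton mask
theorem pvMask_single (L : List Int) (i : Int) (h0 : 0 ≤ i) (h1 : i < L.length) :
    PySem.List.pySetD L i (PySem.Int.mod ((PySem.List.pyGetD L i 0) + 1) 2) = pvMask L i i := by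
  rw [PySem.List.pySetD_of_nonneg _ _ h0,
      PySem.List.pyGetD_eq_getElem _ _ h0 (by exact_mod_cast h1)]
  apply List.ext_getElem (by simp [pvMask_length])
  intro k h1' h2'
  have hk : k < L.length := by simpa using h1'
  simp only [pvMask, List.getElem_mapIdx, List.getElem_set]
  split_ifs with hA hB hB <;> first | rfl | (exfalso; omega) | (subst_vars; rfl)

-- A's pair step: toggling positions lo-1 and hi+1 of the mask extends the mask
theorem pvMask_pair_step (L : List Int) (lo hi : Int) (hlohi : lo ≤ hi + 1)
    (h0 : 0 ≤ lo - 1) (h1 : hi + 1 < L.length) :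
    PySem.List.pySetD
      (PySem.List.pySetD (pvMask L lo hi) (lo - 1)
        (PySem.Int.mod ((PySem.List.pyGetD L (lo - 1) 0) + 1) 2))
      (hi + 1) (PySem.Int.mod ((PySem.List.pyGetD L (hi + 1) 0) + 1) 2) =
    pvMask L (lo - 1) (hi + 1) := by
  rw [PySem.List.pySetD_of_nonneg _ _ h0, PySem.List.pySetD_of_nonneg _ _ (by omega),
      PySem.List.pyGetD_eq_getElem _ _ h0 (by omega),
      PySem.List.pyGetD_eq_getElem _ _ (by omega : (0:Int) ≤ hi + 1) (by exact_mod_cast h1)]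
  apply List.ext_getElem (by simp [pvMask_length])
  intro k hk1 hk2
  have hk : k < L.length := by simpa [pvMask_length] using hk1
  simp only [pvMask, List.getElem_mapIdx, List.getElem_set]
  split_ifs <;> first | rfl | (exfalso; omega) | (subst_vars; rfl)

-- unfolding lemma for A's loop
theorem pvLoopA_eq (L : List Int) (Left Right : Int) :
    pvLoopA L Left Right =
      if 0 ≤ Left ∧ Right ≤ (L.length : Int) - 1 then
        if PySem.List.pyGetD L Left 0 = PySem.List.pyGetD L Right 0 then
          pvLoopA (PySem.List.pySetD (PySem.List.pySetD L Left
                    (PySem.Int.mod ((PySem.List.pyGetD L Left 0) + 1) 2))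
                    Right (PySem.Int.mod ((PySem.List.pyGetD L Right 0) + 1) 2))
            (Left - 1) (Right + 1)
        else L
      else L := by
  rw [pvLoopA]; split <;> simp_all

-- B's single step: toggling position lo just right of the mask extends the mask by one
theorem pvMask_step_right (L : List Int) (base lo : Int) (hb : base ≤ lo)
    (h0 : 0 ≤ lo) (h1 : lo < L.length) :
    PySem.List.pySetD (pvMask L base (lo - 1)) lo
      (PySem.Int.mod ((PySem.List.pyGetD L lo 0) + 1) 2) = pvMask L base lo := by
  rw [PySem.List.pySetD_of_nonneg _ _ h0,
      PySem.List.pyGetD_eq_getElem _ _ h0 (by exact_mod_cast h1)]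
  apply List.ext_getElem (by simp [pvMask_length])
  intro k hk1 hk2
  have hk : k < L.length := by simpa [pvMask_length] using hk1
  simp only [pvMask, List.getElem_mapIdx, List.getElem_set]
  split_ifs <;> first | rfl | (exfalso; omega) | (subst_vars; rfl)

-- measure facts
theorem pvMeasureB_le (L : List Int) (j : Int) : ∀ (d : Nat) (r : Int),
    ((L.length : Int) - (j + r)).toNat ≤ d → r ≤ pvMeasureB L j r := by
  intro d
  induction d with
  | zero =>
    intro r hd
    rw [pvMeasureB]
    split
    next h => exfalso; omega
    next h => omega
  | succ d ih =>
    intro r hd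
    rw [pvMeasureB]
    split
    next h => have := ih (r + 1) (by omega); omega
    next h => omega

theorem pvMeasureB_guard (L : List Int) (j : Int) : ∀ (d : Nat) (r : Int),
    ((L.length : Int) - (j + r)).toNat ≤ d →
    (∀ k, r ≤ k → k < pvMeasureB L j r → pvGuard L j k) ∧ ¬ pvGuard L j (pvMeasureB L j r) := by
  intro d
  induction d with
  | zero =>
    intro r hd
    rw [pvMeasureB]
    split
    next h => exfalso; omega
    next h =>
      exact ⟨fun k hk1 hk2 => absurd hk2 (by omega), h⟩
  | succ d ih =>
    intro r hd
    rw [pvMeasureB]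
    split
    next h =>
      obtain ⟨ih1, ih2⟩ := ih (r + 1) (by omega)
      refine ⟨fun k hk1 hk2 => ?_, ih2⟩
      rcases eq_or_lt_of_le hk1 with rfl | hlt
      · exact h
      · exact ih1 k (by omega) hk2
    next h =>
      exact ⟨fun k hk1 hk2 => absurd hk2 (by omega), h⟩

-- A's loop, started at radius r on the mask of radius r-1, ends at the mask of radius m-1
theorem pvLoopA_run (L : List Int) (j m : Int)
    (hm1 : ∀ k, 1 ≤ k → k < m → pvGuard L j k) (hm2 : ¬ pvGuard L j m) :
    ∀ (d : Nat) (r : Int), (m - r).toNat ≤ d → 1 ≤ r → r ≤ m →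
    pvLoopA (pvMask L (j - (r - 1)) (j + (r - 1))) (j - r) (j + r) =
      pvMask L (j - (m - 1)) (j + (m - 1)) := by
  intro d
  induction d with
  | zero =>
    intro r hd hr1 hrm
    have hrm' : r = m := by omega
    subst hrm'
    rw [pvLoopA_eq]
    simp only [pvMask_length]
    by_cases hb : 0 ≤ j - r ∧ j + r ≤ (L.length : Int) - 1
    · rw [if_pos hb,
        pvMask_pyGetD_out L _ _ _ hb.1 (by omega) (by omega),
        pvMask_pyGetD_out L _ _ _ (by omega) (by omega) (by omega),
        if_neg (fun he => hm2 ⟨hb.1, hb.2, he⟩)]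
    · rw [if_neg hb]
  | succ d ih =>
    intro r hd hr1 hrm
    rcases eq_or_lt_of_le hrm with rfl | hlt
    · rw [pvLoopA_eq]
      simp only [pvMask_length]
      by_cases hb : 0 ≤ j - r ∧ j + r ≤ (L.length : Int) - 1
      · rw [if_pos hb,
          pvMask_pyGetD_out L _ _ _ hb.1 (by omega) (by omega),
          pvMask_pyGetD_out L _ _ _ (by omega) (by omega) (by omega),
          if_neg (fun he => hm2 ⟨hb.1, hb.2, he⟩)]
      · rw [if_neg hb]
    · obtain ⟨hg1, hg2, hg3⟩ := hm1 r hr1 hlt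
      rw [pvLoopA_eq]
      simp only [pvMask_length]
      rw [if_pos ⟨hg1, hg2⟩,
        pvMask_pyGetD_out L _ _ _ hg1 (by omega) (by omega),
        pvMask_pyGetD_out L _ _ _ (by omega) (by omega) (by omega),
        if_pos hg3]
      have hstep := pvMask_pair_step L (j - (r - 1)) (j + (r - 1)) (by omega) (by omega)
        (by omega)
      have e1 : j - (r - 1) - 1 = j - r := by ring
      have e2 : j + (r - 1) + 1 = j + r := by ring
      rw [e1, e2] at hstep
      rw [hg3] at hstep
      rw [hg3, hstep]
      have := ih (r + 1) (by omega) (by omega) (by omega)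
      have e3 : j - (r + 1 - 1) = j - r := by ring
      have e4 : j + (r + 1 - 1) = j + r := by ring
      rw [e3, e4, show j - (r + 1) = j - r - 1 from by ring,
        show j + (r + 1) = j + r + 1 from by ring] at this
      exact this

-- B's toggle pass over [lo, hi) extends a mask [base, lo-1] to [base, hi-1]
theorem pvFoldTog_run (L : List Int) (base : Int) :
    ∀ (d : Nat) (lo hi : Int), (hi - lo).toNat ≤ d → base ≤ lo → lo ≤ hi → 0 ≤ base →
    hi ≤ (L.length : Int) →
    (PySem.List.pyRange lo hi 1).foldl
      (fun M i => PySem.List.pySetD M i (PySem.Int.mod ((PySem.List.pyGetD M i 0) + 1) 2))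
      (pvMask L base (lo - 1)) = pvMask L base (hi - 1) := by
  intro d
  induction d with
  | zero =>
    intro lo hi hd hb hlh h0 hlen
    have : lo = hi := by omega
    subst this
    rw [PySem.List.pyRange_one_eq_nil le_rfl, List.foldl_nil]
  | succ d ih =>
    intro lo hi hd hb hlh h0 hlen
    rcases eq_or_lt_of_le hlh with rfl | hlt
    · rw [PySem.List.pyRange_one_eq_nil le_rfl, List.foldl_nil]
    · rw [PySem.List.pyRange_one_cons hlt, List.foldl_cons]
      rw [pvMask_pyGetD_out L _ _ _ (by omega) (by omega) (by omega),
        pvMask_step_right L base lo hb (by omega) (by omega)]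
      have := ih (lo + 1) hi (by omega) (by omega) (by omega) h0 hlen
      rw [show lo + 1 - 1 = lo from by ring] at this
      exact this

-- ===== VERDICT (by name: the statement is the Claim_ definition above) =====
theorem get_females_spec : Claim_equal_get_females := by
  intro L N _ hPre
  unfold Spec_get_females
  have hPre' := hPre
  simp only [Pre_get_females, PySem.Raise.InRange] at hPre'
  set j := N - 1 with hj
  set v := PySem.Int.mod ((PySem.List.pyGetD L j 0) + 1) 2 with hv
  -- the initial toggled list
  have hnn : PySem.List.pySet? L j v ≠ none := by
    intro h
    exact ((PySem.List.pySet?_eq_none_iff L j v).mp h) ⟨hPre'.1, hPre'.2⟩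
  obtain ⟨L', hL'⟩ := Option.ne_none_iff_exists'.mp hnn
  have hL'eq : L' = PySem.List.pySetD L j v := by
    rw [PySem.List.pySetD, hL']; rfl
  have hA : get_females L N = pvLoopA (PySem.List.pySetD L j v) (j - 1) (j + 1) := by
    simp only [get_females, ← hj, ← hv, hL', hL'eq]
  -- measure facts
  set m := pvMeasureB L j 1 with hm
  have hm_le : 1 ≤ m :=
    pvMeasureB_le L j (((L.length : Int) - (j + 1)).toNat) 1 le_rfl
  obtain ⟨hm1, hm2⟩ := pvMeasureB_guard L j (((L.length : Int) - (j + 1)).toNat) 1 le_rfl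
  have hB : get_females_alt L N =
      (PySem.List.pyRange (j - (m - 1)) (j + (m - 1) + 1) 1).foldl
        (fun M i => PySem.List.pySetD M i (PySem.Int.mod ((PySem.List.pyGetD M i 0) + 1) 2))
        L := by
    simp only [get_females_alt, ← hj, ← hm]
  by_cases hjpos : 0 ≤ j
  · -- main case: the loop may run; both sides equal the mask of radius m-1
    have hrlo : 0 ≤ j - (m - 1) := by
      rcases eq_or_lt_of_le hm_le with heq | hlt
      · omega
      · have := (hm1 (m - 1) (by omega) (by omega)).1
        omega
    have hrhi : j + (m - 1) ≤ (L.length : Int) - 1 := by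
      rcases eq_or_lt_of_le hm_le with heq | hlt
      · omega
      · have := (hm1 (m - 1) (by omega) (by omega)).2.1; omega
    have hsingle : PySem.List.pySetD L j v = pvMask L j j :=
      pvMask_single L j hjpos (by omega)
    have hrun := pvLoopA_run L j m hm1 hm2 (m - 1).toNat 1 (by omega) le_rfl hm_le
    rw [show j - (1 - 1 : Int) = j from by ring, show j + (1 - 1 : Int) = j from by ring] at hrun
    have hfold := pvFoldTog_run L (j - (m - 1)) (2 * (m - 1) + 1).toNat
      (j - (m - 1)) (j + (m - 1) + 1) (by omega) le_rfl (by omega) hrlo (by omega)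
    rw [pvMask_empty L _ _ (by omega),
      show j + (m - 1) + 1 - 1 = j + (m - 1) from by ring] at hfold
    rw [hA, hB, hsingle, hrun, hfold]
  · -- j < 0 (negative index, still in range): the loop never runs, one toggle at j
    have hm1' : m = 1 := by
      rw [hm, pvMeasureB]
      rw [dif_neg]
      intro h
      omega
    rw [hA, hB, hm1']
    rw [pvLoopA_eq, if_neg (by omega)]
    rw [show j - (1 - 1 : Int) = j from by ring,
      show j + (1 - 1 : Int) + 1 = j + 1 from by ring,
      PySem.List.pyRange_one_singleton, List.foldl_cons, List.foldl_nil]
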